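-- pv_equiv track=rewrite | github.com/bryan-clauser/AIContractTesting | contract_ai/diff_engine.py | _diff_fields
-- ===== SOURCE A (Python) =====
-- from typing import Dict, List, Any
--
-- def _diff_fields(
--     path: str,
--     method: str,
--     old_fields: Dict[str, str],
--     new_fields: Dict[str, str],
-- ) -> List[str]:
--     """Compare response field schemas between old and new specs."""
--     changes = []
--
--     old_field_names = set(old_fields.keys())
--     new_field_names = set(new_fields.keys())
--
--     added_fields = new_field_names - old_field_names
--     removed_fields = old_field_names - new_field_names
--     common_fields = old_field_names & new_field_names
--
--     for field in sorted(added_fields):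
--         field_type = new_fields[field]
--         changes.append(
--             f"Endpoint {path} {method}: field '{field}' added (type: {field_type})"
--         )
--
--     for field in sorted(removed_fields):
--         field_type = old_fields[field]
--         changes.append(
--             f"Endpoint {path} {method}: field '{field}' removed (type: {field_type})"
--         )
--
--     # Detect type changes
--     for field in sorted(common_fields):
--         old_type = old_fields[field]
--         new_type = new_fields[field]
--
--         if old_type != new_type:
--             changes.append(
--                 f"Endpoint {path} {method}: field '{field}' type changed from {old_type} to {new_type}"
--             )
--
--     return changes
-- ===== SOURCE B (Python) =====
-- def _fmt_added(path, method, field, t):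
--     return f"Endpoint {path} {method}: field '{field}' added (type: {t})"
--
--
-- def _fmt_removed(path, method, field, t):
--     return f"Endpoint {path} {method}: field '{field}' removed (type: {t})"
--
--
-- def _fmt_changed(path, method, field, old_t, new_t):
--     return f"Endpoint {path} {method}: field '{field}' type changed from {old_t} to {new_t}"
--
--
-- def _diff_fields(path, method, old_fields, new_fields):
--     """Two-pointer merge walk over the two sorted key lists, into three buckets."""
--     olds = sorted(old_fields)
--     news = sorted(new_fields)
--     added, removed, changed = [], [], []
--     i = j = 0
--     while i < len(olds) and j < len(news):
--         if olds[i] < news[j]: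
--             removed.append(_fmt_removed(path, method, olds[i], old_fields[olds[i]]))
--             i += 1
--         elif news[j] < olds[i]:
--             added.append(_fmt_added(path, method, news[j], new_fields[news[j]]))
--             j += 1
--         else:
--             f = olds[i]
--             if old_fields[f] != new_fields[f]:
--                 changed.append(_fmt_changed(path, method, f, old_fields[f], new_fields[f]))
--             i += 1
--             j += 1
--     while i < len(olds):
--         removed.append(_fmt_removed(path, method, olds[i], old_fields[olds[i]]))
--         i += 1
--     while j < len(news):
--         added.append(_fmt_added(path, method, news[j], new_fields[news[j]]))
--         j += 1
--     return added + removed + changed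
-- ===== Notes on version B (the rewrite author's own statement) =====
-- stated objective: alternative
-- what changed: B replaces A's three set computations (difference, difference, intersection) each with its own sorted pass by a single two-pointer merge walk over the two independently sorted key lists, routing each key into one of three buckets.
import Mathlib
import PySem

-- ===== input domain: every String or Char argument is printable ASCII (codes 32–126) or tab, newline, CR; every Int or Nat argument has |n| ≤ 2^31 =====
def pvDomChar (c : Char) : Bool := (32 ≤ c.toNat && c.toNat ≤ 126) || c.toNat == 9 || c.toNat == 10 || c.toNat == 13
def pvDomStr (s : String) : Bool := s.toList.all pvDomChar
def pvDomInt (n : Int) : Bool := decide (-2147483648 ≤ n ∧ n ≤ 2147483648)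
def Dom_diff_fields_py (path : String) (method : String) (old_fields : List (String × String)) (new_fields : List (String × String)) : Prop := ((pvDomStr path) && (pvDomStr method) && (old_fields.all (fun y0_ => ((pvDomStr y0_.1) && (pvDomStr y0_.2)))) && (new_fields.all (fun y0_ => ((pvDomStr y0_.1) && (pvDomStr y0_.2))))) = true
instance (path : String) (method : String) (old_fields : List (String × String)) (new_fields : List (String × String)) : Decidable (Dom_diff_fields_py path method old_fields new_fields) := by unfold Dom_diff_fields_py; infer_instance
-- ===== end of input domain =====

-- B replaces A's three set computations (each with its own sorted pass) by a single
-- two-pointer merge walk over the two sorted key lists (objective: alternative algorithm).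

-- ===== PORT A =====
def diff_fields_py (path : String) (method : String) (old_fields : List (String × String)) (new_fields : List (String × String)) : List String :=
  let oldd := PySem.Dict.ofList old_fields
  let newd := PySem.Dict.ofList new_fields
  let old_field_names := PySem.Set.ofList oldd.keys
  let new_field_names := PySem.Set.ofList newd.keys
  let added_fields := PySem.Set.diff new_field_names old_field_names
  let removed_fields := PySem.Set.diff old_field_names new_field_names
  let common_fields := PySem.Set.inter old_field_names new_field_names
  -- 'new_fields[field]' never raises here (field ∈ new_fields); getD "" is its exact total form
  let changes := (PySem.List.sorted added_fields (fun x => x) false).foldl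
    (fun changes field =>
      changes ++ ["Endpoint " ++ path ++ " " ++ method ++ ": field '" ++ field ++ "' added (type: " ++ newd.getD field "" ++ ")"]) []
  let changes := (PySem.List.sorted removed_fields (fun x => x) false).foldl
    (fun changes field =>
      changes ++ ["Endpoint " ++ path ++ " " ++ method ++ ": field '" ++ field ++ "' removed (type: " ++ oldd.getD field "" ++ ")"]) changes
  let changes := (PySem.List.sorted common_fields (fun x => x) false).foldl
    (fun changes field =>
      if oldd.getD field "" ≠ newd.getD field "" then
        changes ++ ["Endpoint " ++ path ++ " " ++ method ++ ": field '" ++ field ++ "' type changed from " ++ oldd.getD field "" ++ " to " ++ newd.getD field ""]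
      else changes) changes
  changes

-- ===== PORT B =====
def pvFmtAdded (path method field t : String) : String :=
  "Endpoint " ++ path ++ " " ++ method ++ ": field '" ++ field ++ "' added (type: " ++ t ++ ")"

def pvFmtRemoved (path method field t : String) : String :=
  "Endpoint " ++ path ++ " " ++ method ++ ": field '" ++ field ++ "' removed (type: " ++ t ++ ")"

def pvFmtChanged (path method field oldT newT : String) : String :=
  "Endpoint " ++ path ++ " " ++ method ++ ": field '" ++ field ++ "' type changed from " ++ oldT ++ " to " ++ newT

-- the two while loops of Source B as one tail recursion over the two sorted key lists
def pvMerge3 (gA gR gC : String → String) (cC : String → Bool) :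
    List String → List String → List String × List String × List String → List String × List String × List String
  | [], [], acc => acc
  | [], y :: ys, acc => pvMerge3 gA gR gC cC [] ys (acc.1 ++ [gA y], acc.2.1, acc.2.2)
  | x :: xs, [], acc => pvMerge3 gA gR gC cC xs [] (acc.1, acc.2.1 ++ [gR x], acc.2.2)
  | x :: xs, y :: ys, acc =>
    if x < y then
      pvMerge3 gA gR gC cC xs (y :: ys) (acc.1, acc.2.1 ++ [gR x], acc.2.2)
    else if y < x then
      pvMerge3 gA gR gC cC (x :: xs) ys (acc.1 ++ [gA y], acc.2.1, acc.2.2)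
    else
      pvMerge3 gA gR gC cC xs ys (acc.1, acc.2.1, if cC x then acc.2.2 ++ [gC x] else acc.2.2)
  termination_by xs ys _ => xs.length + ys.length

def diff_fields_py_alt (path : String) (method : String) (old_fields : List (String × String)) (new_fields : List (String × String)) : List String :=
  let oldd := PySem.Dict.ofList old_fields
  let newd := PySem.Dict.ofList new_fields
  let olds := PySem.List.sorted oldd.keys (fun x => x) false
  let news := PySem.List.sorted newd.keys (fun x => x) false
  let r := pvMerge3
    (fun f => pvFmtAdded path method f (newd.getD f ""))
    (fun f => pvFmtRemoved path method f (oldd.getD f ""))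
    (fun f => pvFmtChanged path method f (oldd.getD f "") (newd.getD f ""))
    (fun f => decide (oldd.getD f "" ≠ newd.getD f ""))
    olds news ([], [], [])
  r.1 ++ r.2.1 ++ r.2.2

-- ===== PRECONDITION & SPEC =====
def Spec_diff_fields_py (path : String) (method : String) (old_fields : List (String × String)) (new_fields : List (String × String)) (out : List String) : Prop := out = diff_fields_py_alt path method old_fields new_fields
instance (path : String) (method : String) (old_fields : List (String × String)) (new_fields : List (String × String)) (out : List String) : Decidable (Spec_diff_fields_py path method old_fields new_fields out) := by unfold Spec_diff_fields_py; infer_instance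

-- ===== CLAIM (what is proved, stated in full; the proofs are below) =====
def Claim_equal_diff_fields_py : Prop := ∀ (path : String) (method : String) (old_fields : List (String × String)) (new_fields : List (String × String)), Dom_diff_fields_py path method old_fields new_fields → Spec_diff_fields_py path method old_fields new_fields (diff_fields_py path method old_fields new_fields)

-- ===== LEMMAS AND PROOFS =====

-- a fold that appends one element per item is init ++ map
theorem pv_foldl_append_map {α β : Type} (g : α → β) (l : List α) (init : List β) :
    l.foldl (fun acc f => acc ++ [g f]) init = init ++ l.map g := by
  induction l generalizing init with
  | nil => simp
  | cons x xs ih => simp [List.foldl, ih, List.append_assoc]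

-- a fold that conditionally appends is init ++ map of the filter
theorem pv_foldl_append_filter_map {α β : Type} (P : α → Prop) [DecidablePred P]
    (g : α → β) (l : List α) (init : List β) :
    l.foldl (fun acc f => if P f then acc ++ [g f] else acc) init
      = init ++ (l.filter (fun f => decide (P f))).map g := by
  induction l generalizing init with
  | nil => simp
  | cons x xs ih =>
    rw [List.foldl_cons]
    by_cases h : P x
    · rw [if_pos h, ih]
      simp [h, List.append_assoc]
    · rw [if_neg h, ih]
      simp [h]

-- the merge walk computes three filtered maps of its strictly sorted inputs
theorem pv_merge3_eq (gA gR gC : String → String) (cC : String → Bool)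
    (xs ys : List String) (acc : List String × List String × List String)
    :
    xs.Pairwise (fun a b => a < b) → ys.Pairwise (fun a b => a < b) →
    pvMerge3 gA gR gC cC xs ys acc
      = (acc.1 ++ (ys.filter (fun y => decide (y ∉ xs))).map gA,
         acc.2.1 ++ (xs.filter (fun x => decide (x ∉ ys))).map gR,
         acc.2.2 ++ (xs.filter (fun x => decide (x ∈ ys) && cC x)).map gC) := by
  induction xs generalizing ys acc with
  | nil =>
    induction ys generalizing acc with
    | nil => intro _ _; simp [pvMerge3]
    | cons y ys ihy =>
      intro hx hy
      rw [pvMerge3, ihy _ hx (List.Pairwise.sublist (List.sublist_cons_self y ys) hy)]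
      simp [List.append_assoc]
  | cons x xs ihx =>
    induction ys generalizing acc with
    | nil =>
      intro hx _
      rw [pvMerge3, ihx [] _ (List.Pairwise.sublist (List.sublist_cons_self x xs) hx) List.Pairwise.nil]
      simp [List.append_assoc]
    | cons y ys ihy =>
      intro hx hy
      have hxlt : ∀ z ∈ xs, x < z := fun z hz => (List.pairwise_cons.mp hx).1 z hz
      have hylt : ∀ z ∈ ys, y < z := fun z hz => (List.pairwise_cons.mp hy).1 z hz
      have hxtail := (List.pairwise_cons.mp hx).2
      have hytail := (List.pairwise_cons.mp hy).2
      rw [pvMerge3]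
      by_cases hlt : x < y
      · -- x only in olds: x goes to the removed bucket
        have hxgt : ∀ z ∈ y :: ys, x < z := by
          intro z hz
          rcases List.mem_cons.mp hz with h | h
          · exact h ▸ hlt
          · exact lt_trans hlt (hylt z h)
        have hxny : x ∉ y :: ys := fun h => absurd (hxgt x h) (lt_irrefl x)
        rw [if_pos hlt, ihx (y :: ys) _ hxtail hy]
        have hfA : (y :: ys).filter (fun z => decide (z ∉ x :: xs))
            = (y :: ys).filter (fun z => decide (z ∉ xs)) := by
          apply List.filter_congr
          intro z hz
          exact decide_eq_decide.mpr (by simp [List.mem_cons, ne_of_gt (hxgt z hz)])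
        rw [hfA]
        simp only [List.filter_cons]
        simp [hxny, List.append_assoc]
      · rw [if_neg hlt]
        by_cases hgt : y < x
        · -- y only in news: y goes to the added bucket
          have hygt : ∀ z ∈ x :: xs, y < z := by
            intro z hz
            rcases List.mem_cons.mp hz with h | h
            · exact h ▸ hgt
            · exact lt_trans hgt (hxlt z h)
          have hynx : y ∉ x :: xs := fun h => absurd (hygt y h) (lt_irrefl y)
          rw [if_pos hgt, ihy _ hx hytail]
          have hfR : (x :: xs).filter (fun z => decide (z ∉ y :: ys))
              = (x :: xs).filter (fun z => decide (z ∉ ys)) := by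
            apply List.filter_congr
            intro z hz
            exact decide_eq_decide.mpr (by simp [List.mem_cons, ne_of_gt (hygt z hz)])
          have hfC : (x :: xs).filter (fun z => decide (z ∈ y :: ys) && cC z)
              = (x :: xs).filter (fun z => decide (z ∈ ys) && cC z) := by
            apply List.filter_congr
            intro z hz
            rw [show decide (z ∈ y :: ys) = decide (z ∈ ys) from
              decide_eq_decide.mpr (by simp [List.mem_cons, ne_of_gt (hygt z hz)])]
          rw [hfR, hfC]
          simp only [List.filter_cons]
          simp [hynx, List.append_assoc]
        · -- common field: maybe the changed bucket
          have hxy : x = y := le_antisymm (not_lt.mp hgt) (not_lt.mp hlt)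
          subst hxy
          rw [if_neg hgt, ihx ys _ hxtail hytail]
          have hxnys : x ∉ ys := fun h => absurd (hylt x h) (lt_irrefl x)
          have hxnxs : x ∉ xs := fun h => absurd (hxlt x h) (lt_irrefl x)
          have hfA : (x :: ys).filter (fun z => decide (z ∉ x :: xs))
              = ys.filter (fun z => decide (z ∉ xs)) := by
            rw [List.filter_cons]
            rw [if_neg (by simp)]
            apply List.filter_congr
            intro z hz
            exact decide_eq_decide.mpr (by simp [List.mem_cons, ne_of_gt (hylt z hz)])
          have hfR : (x :: xs).filter (fun z => decide (z ∉ x :: ys))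
              = xs.filter (fun z => decide (z ∉ ys)) := by
            rw [List.filter_cons]
            rw [if_neg (by simp)]
            apply List.filter_congr
            intro z hz
            exact decide_eq_decide.mpr (by simp [List.mem_cons, ne_of_gt (hxlt z hz)])
          have hfC : (x :: xs).filter (fun z => decide (z ∈ x :: ys) && cC z)
              = (if cC x then [x] else []) ++ xs.filter (fun z => decide (z ∈ ys) && cC z) := by
            rw [List.filter_cons]
            have hcons : ∀ z ∈ xs, (decide (z ∈ x :: ys) && cC z) = (decide (z ∈ ys) && cC z) := by
              intro z hz
              rw [show decide (z ∈ x :: ys) = decide (z ∈ ys) from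
                decide_eq_decide.mpr (by simp [List.mem_cons, ne_of_gt (hxlt z hz)])]
            rw [List.filter_congr hcons]
            by_cases hc : cC x = true
            · simp [hc]
            · simp [hc]
          rw [hfA, hfR, hfC]
          by_cases hc : cC x = true
          · simp [hc, List.append_assoc]
          · simp [hc]

-- the sorted list of a sub-set equals the filter of the sorted base list
theorem pv_sorted_filter (u s : List String) (p : String → Bool)
    (hu : u.Nodup) (hs : s.Nodup)
    (hmem : ∀ x, x ∈ s ↔ x ∈ u ∧ p x = true) :
    PySem.List.sorted s (fun x => x) false
      = (PySem.List.sorted u (fun x => x) false).filter p := by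
  have hperm : (PySem.List.sorted u (fun x => x) false).Perm u :=
    PySem.List.sorted_perm u (fun x => x) false
  have hnd : (PySem.List.sorted u (fun x => x) false).Nodup := hperm.nodup_iff.mpr hu
  have hle : (PySem.List.sorted u (fun x => x) false).Pairwise (fun a b => a ≤ b) :=
    PySem.List.sorted_pairwise u (fun x => x)
  have hlt : (PySem.List.sorted u (fun x => x) false).Pairwise (fun a b => a < b) :=
    (hle.and hnd).imp (fun h => lt_of_le_of_ne h.1 h.2)
  apply PySem.List.sorted_eq_of_perm_of_pairwise_lt
  · rw [List.perm_ext_iff_of_nodup (hnd.filter p) hs]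
    intro x
    simp only [List.mem_filter, hperm.mem_iff, hmem]
  · exact hlt.sublist List.filter_sublist

-- sorted keys of a dict are strictly sorted
theorem pv_sorted_keys_lt (l : List (String × String)) :
    (PySem.List.sorted (PySem.Dict.ofList l).keys (fun x => x) false).Pairwise (fun a b => a < b) := by
  have hperm := PySem.List.sorted_perm (PySem.Dict.ofList l).keys (fun x => x) false
  have hnd := hperm.nodup_iff.mpr (PySem.Dict.nodup_keys_ofList l)
  have hle : (PySem.List.sorted (PySem.Dict.ofList l).keys (fun x => x) false).Pairwise (fun a b => a ≤ b) :=
    PySem.List.sorted_pairwise (PySem.Dict.ofList l).keys (fun x => x)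
  exact (hle.and hnd).imp (fun h => lt_of_le_of_ne h.1 h.2)

-- ===== VERDICT (by name: the statement is the Claim_ definition above) =====
theorem diff_fields_py_spec : Claim_equal_diff_fields_py := by
  intro path method old_fields new_fields _
  unfold Spec_diff_fields_py diff_fields_py diff_fields_py_alt
  simp only []
  set oldd := PySem.Dict.ofList old_fields with hod
  set newd := PySem.Dict.ofList new_fields with hnd
  rw [pv_merge3_eq _ _ _ _ _ _ _ (pv_sorted_keys_lt old_fields) (pv_sorted_keys_lt new_fields)]
  rw [pv_foldl_append_map, pv_foldl_append_map, pv_foldl_append_filter_map]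
  rw [pv_sorted_filter newd.keys (PySem.Set.diff (PySem.Set.ofList newd.keys) (PySem.Set.ofList oldd.keys))
        (fun y => decide (y ∉ PySem.List.sorted oldd.keys (fun x => x) false))
        (PySem.Dict.nodup_keys_ofList new_fields)
        (PySem.Set.nodup_diff _ _ (PySem.Set.nodup_ofList _))
        (by
          intro x
          rw [PySem.Set.mem_diff, PySem.Set.mem_ofList, PySem.Set.mem_ofList]
          rw [show ((fun y => decide (y ∉ PySem.List.sorted oldd.keys (fun x => x) false)) x = true)
                ↔ x ∉ oldd.keys by simp]
          )]
  rw [pv_sorted_filter oldd.keys (PySem.Set.diff (PySem.Set.ofList oldd.keys) (PySem.Set.ofList newd.keys))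
        (fun y => decide (y ∉ PySem.List.sorted newd.keys (fun x => x) false))
        (PySem.Dict.nodup_keys_ofList old_fields)
        (PySem.Set.nodup_diff _ _ (PySem.Set.nodup_ofList _))
        (by
          intro x
          rw [PySem.Set.mem_diff, PySem.Set.mem_ofList, PySem.Set.mem_ofList]
          rw [show ((fun y => decide (y ∉ PySem.List.sorted newd.keys (fun x => x) false)) x = true)
                ↔ x ∉ newd.keys by simp]
          )]
  rw [pv_sorted_filter oldd.keys (PySem.Set.inter (PySem.Set.ofList oldd.keys) (PySem.Set.ofList newd.keys))
        (fun y => decide (y ∈ PySem.List.sorted newd.keys (fun x => x) false))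
        (PySem.Dict.nodup_keys_ofList old_fields)
        (PySem.Set.nodup_inter _ _ (PySem.Set.nodup_ofList _))
        (by
          intro x
          rw [PySem.Set.mem_inter, PySem.Set.mem_ofList, PySem.Set.mem_ofList]
          rw [show ((fun y => decide (y ∈ PySem.List.sorted newd.keys (fun x => x) false)) x = true)
                ↔ x ∈ newd.keys by simp]
          )]
  rw [List.filter_filter]
  simp only [pvFmtAdded, pvFmtRemoved, pvFmtChanged, List.nil_append, List.append_assoc,
    Bool.and_comm]
  rw [← hod, ← hnd]
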